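-- pv_equiv track=rewrite | github.com/MarioLara21/TodasFunciones | Examen4.py | multPar
-- ===== SOURCE A (Python) =====
-- def esPar(num):
--     """
--     Funcionalidad: Verifica si el dígito es par
--     Entradas: num= Número entero
--     Salidas: Si el número es par o no
--     Restricciones: El dato debe ser un número
--     """
--     if num%2==0:
--         return True
--     return False
--
-- def multPar(num):
--     """
--     Funcionalidad: Multiplica los números pares de una cifra
--     Entradas: num= Número entero
--     Salidas: Dígitos pares multiplicados
--     Restricciones: El número debe ser entero
--     """
--     if (num//10)==0:
--         if esPar(num)==False:
--            return 1*num
--         else: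
--             return num
--     else:
--         if esPar(num%10)==False:
--             return multPar(num//10)
--         else:
--             return (num%10) * multPar(num//10)
-- ===== SOURCE B (Python) =====
-- def multPar(num):
--     result = 1
--     while num // 10 != 0:
--         d = num % 10
--         if d % 2 == 0:
--             result *= d
--         num //= 10
--     return result * num
-- ===== Notes on version B (the rewrite author's own statement) =====
-- stated objective: simpler
-- what changed: Replaces A's recursion (with a helper parity predicate) by a single iterative while-loop with a running product accumulator, multiplying in the leading digit once at the end.
import Mathlib
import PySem

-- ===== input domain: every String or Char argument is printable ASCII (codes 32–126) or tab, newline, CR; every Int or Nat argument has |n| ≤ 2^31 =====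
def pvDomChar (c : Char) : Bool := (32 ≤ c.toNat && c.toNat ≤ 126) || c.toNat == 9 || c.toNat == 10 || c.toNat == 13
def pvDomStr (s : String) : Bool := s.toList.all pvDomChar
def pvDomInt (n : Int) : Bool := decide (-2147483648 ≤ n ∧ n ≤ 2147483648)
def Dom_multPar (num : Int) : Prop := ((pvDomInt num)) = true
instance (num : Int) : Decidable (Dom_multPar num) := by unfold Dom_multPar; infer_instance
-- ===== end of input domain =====

-- B replaces A's recursion by an iterative while-loop with a product accumulator (return value only).

-- ===== PORT A =====
def esPar (num : Int) : Bool :=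
  if PySem.Int.mod num 2 == 0 then true else false

-- A's recursion, fuel-indexed; fuel num.toNat + 1 always suffices on Pre_ (num ≥ 0).
def multParFuel : Nat → Int → Int
  | 0, _ => 0
  | f + 1, num =>
    if PySem.Int.floordiv num 10 == 0 then
      if esPar num == false then 1 * num else num
    else
      if esPar (PySem.Int.mod num 10) == false then
        multParFuel f (PySem.Int.floordiv num 10)
      else
        (PySem.Int.mod num 10) * multParFuel f (PySem.Int.floordiv num 10)

def multPar (num : Int) : Int := multParFuel (num.toNat + 1) num

-- ===== PORT B =====
-- B's while-loop, fuel-indexed with the same fuel bound.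
def multParLoop : Nat → Int → Int → Int
  | 0, _, _ => 0
  | f + 1, num, result =>
    if PySem.Int.floordiv num 10 != 0 then
      multParLoop f (PySem.Int.floordiv num 10)
        (if PySem.Int.mod (PySem.Int.mod num 10) 2 == 0 then result * PySem.Int.mod num 10 else result)
    else
      result * num

def multPar_alt (num : Int) : Int := multParLoop (num.toNat + 1) num 1

-- ===== PRECONDITION & SPEC =====
-- Pre_ excludes negative num: there A recurses forever (RecursionError) and B's loop diverges.
def Pre_multPar (num : Int) : Prop := 0 ≤ num
instance (num : Int) : Decidable (Pre_multPar num) := by unfold Pre_multPar; infer_instance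
def pvWitness_multPar : Int := 2468

def Spec_multPar (num : Int) (out : Int) : Prop := out = multPar_alt num
instance (num : Int) (out : Int) : Decidable (Spec_multPar num out) := by unfold Spec_multPar; infer_instance

-- ===== CLAIM (what is proved, stated in full; the proofs are below) =====
def Claim_equal_multPar : Prop := ∀ (num : Int), Dom_multPar num → Pre_multPar num → Spec_multPar num (multPar num)

-- ===== LEMMAS AND PROOFS =====

-- Loop invariant: the accumulator factors out of B's loop, whose body then matches A's recursion.
lemma multParLoop_eq (f : Nat) : ∀ (num r : Int), multParLoop f num r = r * multParFuel f num := by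
  induction f with
  | zero => intro num r; simp [multParLoop, multParFuel]
  | succ f ih =>
    intro num r
    simp only [multParLoop, multParFuel, esPar]
    simp [ih, mul_assoc]
    by_cases h : num / 10 = 0
    · simp [h]
    · simp only [h, if_false]
      by_cases hp : (2 : Int) ∣ num
      · have h0 : ¬ (num % 2 = 1) := by omega
        simp [hp, h0]
      · have h1 : num % 2 = 1 := by omega
        simp [hp, h1]

-- ===== VERDICT (by name: the statement is the Claim_ definition above) =====
theorem multPar_spec : Claim_equal_multPar := by
  intro num _ _
  unfold Spec_multPar multPar multPar_alt
  rw [multParLoop_eq, one_mul]
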